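-- pv_equiv track=rewrite | github.com/yijianli-autra/explore_gcc | toolchain/wrapper_compiler/mock_cc2.py | search_value
-- ===== SOURCE A (Python) =====
-- def search_value(argv_list, argv_key):
--     return_next = False
--     for value in argv_list:
--         if return_next:
--             return value
--         if value == argv_key:
--             return_next = True
--
--     return ''
-- ===== SOURCE B (Python) =====
-- def search_value(argv_list, argv_key):
--     ans = ''
--     nxt = ''
--     for value in reversed(argv_list):
--         if value == argv_key:
--             ans = nxt
--         nxt = value
--     return ans
-- ===== Notes on version B (the rewrite author's own statement) =====
-- stated objective: alternative
-- what changed: Replaces A's forward scan with a delayed boolean flag by a reverse (right-to-left) traversal carrying an (answer, successor) accumulator: each key occurrence overwrites the answer with its successor, so the last overwrite - the leftmost occurrence - wins, matching A's first-occurrence semantics.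
import Mathlib
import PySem

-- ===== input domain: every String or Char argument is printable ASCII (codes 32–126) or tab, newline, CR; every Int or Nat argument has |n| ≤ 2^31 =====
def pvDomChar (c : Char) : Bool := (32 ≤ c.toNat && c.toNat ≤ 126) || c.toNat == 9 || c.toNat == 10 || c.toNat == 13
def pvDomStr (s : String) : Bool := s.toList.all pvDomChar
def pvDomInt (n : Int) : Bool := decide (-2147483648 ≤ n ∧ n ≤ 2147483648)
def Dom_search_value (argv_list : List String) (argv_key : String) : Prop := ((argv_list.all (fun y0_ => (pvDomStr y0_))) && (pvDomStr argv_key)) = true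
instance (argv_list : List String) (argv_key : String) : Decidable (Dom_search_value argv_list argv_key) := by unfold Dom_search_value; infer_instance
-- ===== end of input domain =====

-- B replaces A's forward flag-carrying scan by a reverse traversal with an (answer, successor)
-- accumulator: the leftmost key occurrence is processed last and overwrites the answer; same cost.

-- ===== PORT A =====
-- A's loop carrying the return_next flag.
def svA_loop (argv_key : String) : List String → Bool → String
  | [], _ => ""
  | v :: rest, return_next =>
    if return_next then v
    else svA_loop argv_key rest (if v == argv_key then true else return_next)

def search_value (argv_list : List String) (argv_key : String) : String :=
  svA_loop argv_key argv_list false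

-- ===== PORT B =====
-- B's loop body: state (ans, nxt); on a key hit ans becomes the current successor; nxt becomes v.
def svB_step (argv_key : String) (st : String × String) (v : String) : String × String :=
  ((if v == argv_key then st.2 else st.1), v)

def search_value_alt (argv_list : List String) (argv_key : String) : String :=
  (argv_list.reverse.foldl (svB_step argv_key) ("", "")).1

-- ===== PRECONDITION & SPEC =====
def Spec_search_value (argv_list : List String) (argv_key : String) (out : String) : Prop := out = search_value_alt argv_list argv_key
instance (argv_list : List String) (argv_key : String) (out : String) : Decidable (Spec_search_value argv_list argv_key out) := by unfold Spec_search_value; infer_instance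

-- ===== CLAIM (what is proved, stated in full; the proofs are below) =====
def Claim_equal_search_value : Prop := ∀ (argv_list : List String) (argv_key : String), Dom_search_value argv_list argv_key → Spec_search_value argv_list argv_key (search_value argv_list argv_key)

-- ===== LEMMAS AND PROOFS =====
-- The reverse foldl is the foldr with the arguments flipped.
theorem svB_as_foldr (k : String) (l : List String) :
    l.reverse.foldl (svB_step k) ("", "") = l.foldr (fun v st => svB_step k st v) ("", "") := by
  simp [List.foldl_reverse]

-- The second component of B's state after folding l is l's head (or "" for []).
theorem svB_snd (k : String) (l : List String) :
    (l.foldr (fun v st => svB_step k st v) ("", "")).2 = l.headD "" := by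
  cases l <;> simp [svB_step]

-- A's loop with the flag set returns the head (or "").
theorem svA_true (k : String) (l : List String) : svA_loop k l true = l.headD "" := by
  cases l <;> rfl

theorem svA_eq_svB (k : String) (l : List String) :
    svA_loop k l false = (l.foldr (fun v st => svB_step k st v) ("", "")).1 := by
  induction l with
  | nil => rfl
  | cons v rest ih =>
    show svA_loop k rest (if v == k then true else false)
       = (svB_step k (rest.foldr (fun v st => svB_step k st v) ("", "")) v).1
    cases h : v == k
    · simpa [svB_step, h] using ih
    · rw [if_pos rfl, svA_true, ← svB_snd k rest]
      simp [svB_step, h]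

-- ===== VERDICT (by name: the statement is the Claim_ definition above) =====
theorem search_value_spec : Claim_equal_search_value := by
  intro l k _
  unfold Spec_search_value search_value search_value_alt
  rw [svB_as_foldr]
  exact svA_eq_svB k l
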